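-- pv_equiv track=rewrite | github.com/minsungChung/bae-joon- | 백준/Silver/4659. 비밀번호 발음하기/비밀번호 발음하기.py | check_pw
-- ===== SOURCE A (Python) =====
-- def check_pw(pw):
--     vowel = ['a', 'e', 'i', 'o', 'u']
--     if 'a' not in pw and 'e' not in pw and 'i' not in pw and 'o' not in pw and 'u' not in pw:
--         return False
--     for i in range(len(pw)-1):
--         if pw[i] == pw[i+1]:
--             if pw[i] != 'e' and pw[i] != 'o':
--                 return False
--
--         if i != len(pw)-2 and pw[i] in vowel and pw[i+1] in vowel and pw[i+2] in vowel:
--             return False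
--         if i != len(pw)-2 and pw[i] not in vowel and pw[i+1] not in vowel and pw[i+2] not in vowel:
--             return False
--     return True
-- ===== SOURCE B (Python) =====
-- def check_pw(pw):
--     vowels = set('aeiou')
--     has_vowel = False
--     vrun = crun = 0
--     prev = None
--     for c in pw:
--         if c in vowels:
--             has_vowel = True
--             vrun += 1
--             crun = 0
--         else:
--             crun += 1
--             vrun = 0
--         if vrun == 3 or crun == 3:
--             return False
--         if prev == c and c not in ('e', 'o'):
--             return False
--         prev = c
--     return has_vowel
-- ===== Notes on version B (the rewrite author's own statement) =====
-- stated objective: simpler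
-- what changed: Replaced the index-based scan with pw[i+1]/pw[i+2] lookahead (plus a separate five-fold substring test for the vowel guard) by a single streaming pass over the characters that maintains a has-vowel flag, resettable vowel/consonant run counters and the previous character.
import Mathlib
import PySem

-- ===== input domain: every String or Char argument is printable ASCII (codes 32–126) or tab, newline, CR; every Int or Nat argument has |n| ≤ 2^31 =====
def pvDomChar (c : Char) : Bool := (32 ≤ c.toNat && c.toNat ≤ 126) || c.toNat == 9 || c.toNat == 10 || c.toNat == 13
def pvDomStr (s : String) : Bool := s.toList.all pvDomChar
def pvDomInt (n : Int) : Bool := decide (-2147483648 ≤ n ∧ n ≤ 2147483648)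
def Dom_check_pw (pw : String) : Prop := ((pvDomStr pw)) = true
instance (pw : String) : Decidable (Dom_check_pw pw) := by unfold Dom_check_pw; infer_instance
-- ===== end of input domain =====

-- B replaces A's index-based lookahead scan by a single streaming pass with run counters; objective: simpler.

-- ===== PORT A =====
def pyVowelA : List Char := ['a', 'e', 'i', 'o', 'u']

-- A's for-loop over the remaining index list; every index pyRange yields is in range
-- (i ≤ len-2, and pw[i+2] is read only under the guard i ≠ len-2), so pyGetD is exact here.
def checkALoop (cs : List Char) : List Int → Bool
  | [] => true
  | i :: rest =>
    if PySem.List.pyGetD cs i ' ' = PySem.List.pyGetD cs (i + 1) ' ' ∧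
        PySem.List.pyGetD cs i ' ' ≠ 'e' ∧ PySem.List.pyGetD cs i ' ' ≠ 'o' then false
    else if i ≠ (cs.length : Int) - 2 ∧ pyVowelA.contains (PySem.List.pyGetD cs i ' ') ∧
        pyVowelA.contains (PySem.List.pyGetD cs (i + 1) ' ') ∧
        pyVowelA.contains (PySem.List.pyGetD cs (i + 2) ' ') then false
    else if i ≠ (cs.length : Int) - 2 ∧ ¬pyVowelA.contains (PySem.List.pyGetD cs i ' ') ∧
        ¬pyVowelA.contains (PySem.List.pyGetD cs (i + 1) ' ') ∧
        ¬pyVowelA.contains (PySem.List.pyGetD cs (i + 2) ' ') then false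
    else checkALoop cs rest

def check_pw (pw : String) : Bool :=
  if ¬PySem.Str.isIn "a" pw ∧ ¬PySem.Str.isIn "e" pw ∧ ¬PySem.Str.isIn "i" pw ∧
      ¬PySem.Str.isIn "o" pw ∧ ¬PySem.Str.isIn "u" pw then false
  else
    checkALoop pw.toList (PySem.List.pyRange 0 (PySem.Str.len pw - 1) 1)

-- ===== PORT B =====
def bVowels : PySem.Set Char := PySem.Set.ofList "aeiou".toList

def checkBLoop : List Char → Bool → Nat → Nat → Option Char → Bool
  | [], hasVowel, _, _, _ => hasVowel
  | c :: rest, hasVowel, vrun, crun, prev =>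
    let isv := PySem.Set.contains bVowels c
    let hasVowel' := if isv then true else hasVowel
    let vrun' := if isv then vrun + 1 else 0
    let crun' := if isv then 0 else crun + 1
    if vrun' = 3 ∨ crun' = 3 then false
    else if prev = some c ∧ ¬(c = 'e' ∨ c = 'o') then false
    else checkBLoop rest hasVowel' vrun' crun' (some c)

def check_pw_alt (pw : String) : Bool := checkBLoop pw.toList false 0 0 none

-- ===== PRECONDITION & SPEC =====
def Spec_check_pw (pw : String) (out : Bool) : Prop := out = check_pw_alt pw
instance (pw : String) (out : Bool) : Decidable (Spec_check_pw pw out) := by unfold Spec_check_pw; infer_instance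

-- ===== CLAIM (what is proved, stated in full; the proofs are below) =====
def Claim_equal_check_pw : Prop := ∀ (pw : String), Dom_check_pw pw → Spec_check_pw pw (check_pw pw)

-- ===== LEMMAS AND PROOFS =====

def isV (c : Char) : Bool := pyVowelA.contains c

def badDup (a b : Char) : Bool := decide (a = b ∧ a ≠ 'e' ∧ a ≠ 'o')

def bad3 (a b c : Char) : Bool := (isV a && isV b && isV c) || (!isV a && !isV b && !isV c)

-- violations strictly after a prefix whose last two characters are a, b
def futureBad : Char → Char → List Char → Bool
  | _, _, [] => false
  | a, b, c :: t => bad3 a b c || badDup b c || futureBad b c t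

-- violations seen from A's window walk: current char a, rest of the string
def windows : Char → List Char → Bool
  | _, [] => false
  | a, [b] => badDup a b
  | a, b :: c :: t => badDup a b || bad3 a b c || windows b (c :: t)

def wtop : List Char → Bool
  | [] => false
  | a :: t => windows a t

-- trailing vowel / consonant run lengths after a violation-free prefix ending in a, b
def vr2 (a b : Char) : Nat := if isV b then (if isV a then 2 else 1) else 0
def cr2 (a b : Char) : Nat := if isV b then 0 else (if isV a then 1 else 2)

theorem windows_eq : ∀ (t : List Char) (a b : Char),
    windows a (b :: t) = (badDup a b || futureBad a b t)
  | [], a, b => by simp [windows, futureBad]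
  | c :: t, a, b => by
    rw [show windows a (b :: c :: t) = (badDup a b || bad3 a b c || windows b (c :: t)) from rfl,
        windows_eq t b c]
    simp only [futureBad]
    cases badDup a b <;> cases bad3 a b c <;> simp [Bool.or_assoc]

theorem contains_bVowels (c : Char) : PySem.Set.contains bVowels c = isV c := by
  have h : bVowels = pyVowelA := by decide
  rw [h]
  simp [PySem.Set.contains, isV]

theorem checkBLoop_inv (t : List Char) : ∀ a b hv,
    checkBLoop t hv (vr2 a b) (cr2 a b) (some b) =
      (!futureBad a b t && (hv || t.any isV)) := by
  induction t with
  | nil => intro a b hv; simp [checkBLoop, futureBad]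
  | cons c t ih =>
    intro a b hv
    simp only [checkBLoop, contains_bVowels, futureBad]
    by_cases hbc : b = c
    · subst hbc
      by_cases ha : isV a = true <;> by_cases hb : isV b = true <;>
        by_cases he : b = 'e' <;> by_cases ho : b = 'o' <;>
          simp_all [vr2, cr2, bad3, badDup, ih, List.any_cons, show isV 'e' = true from rfl, show isV 'o' = true from rfl] <;>
            (try cases hv) <;> (try simp [Bool.or_comm, Bool.or_assoc, Bool.or_left_comm]) <;>
            (try first
              | simpa [vr2, cr2, ha, hb] using (ih b b).1
              | simpa [vr2, cr2, ha, hb] using (ih b b).2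
              | simpa [vr2, cr2, show isV 'e' = true from rfl] using (ih 'e' 'e').2
              | simpa [vr2, cr2, show isV 'o' = true from rfl] using (ih 'o' 'o').2
              )
    · by_cases ha : isV a = true <;> by_cases hb : isV b = true <;>
        by_cases hc : isV c = true <;>
          simp_all [vr2, cr2, bad3, badDup, ih, List.any_cons, show isV 'e' = true from rfl, show isV 'o' = true from rfl] <;>
            (try cases hv) <;> (try simp [Bool.or_comm, Bool.or_assoc, Bool.or_left_comm]) <;>
            (try first
              | simpa [vr2, cr2, ha, hb, hc] using (ih b c).1
              | simpa [vr2, cr2, ha, hb, hc] using (ih b c).2)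

theorem checkBLoop_eq (cs : List Char) :
    checkBLoop cs false 0 0 none = (!wtop cs && cs.any isV) := by
  match cs with
  | [] => simp [checkBLoop, wtop]
  | [a] =>
    simp only [checkBLoop, contains_bVowels]
    cases ha : isV a <;> simp [checkBLoop, ha, wtop, windows]
  | a :: b :: t =>
    rw [wtop, windows_eq]
    simp only [checkBLoop, contains_bVowels]
    by_cases hab : a = b
    · subst hab
      by_cases heo : a = 'e' ∨ a = 'o'
      · have ha : isV a = true := by rcases heo with h | h <;> subst h <;> rfl
        have h2 := checkBLoop_inv t a a true
        simp only [vr2, cr2, ha, if_true] at h2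
        simp [ha, heo, badDup, h2, bad3, List.any_cons]
      · push_neg at heo
        cases ha : isV a <;> simp [ha, heo.1, heo.2, badDup, List.any_cons]
    · by_cases ha : isV a = true <;> by_cases hb : isV b = true
      · have h2 := checkBLoop_inv t a b true
        simp [vr2, cr2, ha, hb] at h2
        simp [ha, hb, hab, badDup, bad3, h2, List.any_cons, Bool.or_assoc]
      · have h2 := checkBLoop_inv t a b true
        simp [vr2, cr2, ha, hb] at h2
        simp [ha, hb, hab, badDup, bad3, h2, List.any_cons, Bool.or_assoc]
      · have h2 := checkBLoop_inv t a b true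
        simp [vr2, cr2, ha, hb] at h2
        simp [ha, hb, hab, badDup, bad3, h2, List.any_cons, Bool.or_assoc]
      · have h2 := checkBLoop_inv t a b false
        simp [vr2, cr2, ha, hb] at h2
        simp [ha, hb, hab, badDup, bad3, h2, List.any_cons, Bool.or_assoc]

theorem wtop_short (l : List Char) (h : l.length ≤ 1) : wtop l = false := by
  cases l with
  | nil => rfl
  | cons a t =>
    cases t with
    | nil => rfl
    | cons b t' => simp at h

theorem checkALoop_drop (k : Nat) : ∀ (i : Nat) (cs : List Char), cs.length ≤ i + k + 1 →
    checkALoop cs (PySem.List.pyRange (i : Int) ((cs.length : Int) - 1) 1) = !wtop (cs.drop i) := by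
  induction k with
  | zero =>
    intro i cs hlen
    rw [PySem.List.pyRange_one_eq_nil (by push_cast; omega),
        wtop_short _ (by simp; omega)]
    rfl
  | succ k ih =>
    intro i cs hlen
    by_cases hsmall : cs.length ≤ i + 1
    · rw [PySem.List.pyRange_one_eq_nil (by push_cast; omega),
          wtop_short _ (by simp; omega)]
      rfl
    · have hi1 : i + 1 < cs.length := by omega
      have hi : i < cs.length := by omega
      rw [PySem.List.pyRange_one_cons (by push_cast; omega)]
      have c1 : ((i : Int) + 1) = ((i + 1 : Nat) : Int) := by push_cast; ring
      have c2 : ((i : Int) + 2) = ((i + 2 : Nat) : Int) := by push_cast; ring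
      simp only [checkALoop, c1, c2, PySem.List.pyGetD_natCast]
      have hrec := ih (i + 1) cs (by omega)
      rw [hrec]
      set a := cs.getD i ' ' with ha'
      set b := cs.getD (i + 1) ' ' with hb'
      set c := cs.getD (i + 2) ' ' with hc'
      have hd0 : cs.drop i = a :: cs.drop (i + 1) := by
        rw [ha', List.getD_eq_getElem cs ' ' hi]
        exact List.drop_eq_getElem_cons hi
      have hd1 : cs.drop (i + 1) = b :: cs.drop (i + 2) := by
        rw [hb', List.getD_eq_getElem cs ' ' hi1]
        exact List.drop_eq_getElem_cons hi1
      by_cases hlast : i + 2 = cs.length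
      · have hguard : ((i : Int)) = (cs.length : Int) - 2 := by omega
        have hd2 : cs.drop (i + 2) = [] := by
          rw [List.drop_eq_nil_iff]; omega
        rw [hd0, hd1, hd2]
        simp only [wtop, windows]
        by_cases hD : (a = b ∧ a ≠ 'e' ∧ a ≠ 'o') <;> simp [badDup, hD, hguard]
      · have hi2 : i + 2 < cs.length := by omega
        have hguard : ((i : Int)) ≠ (cs.length : Int) - 2 := by omega
        have hd2 : cs.drop (i + 2) = c :: cs.drop (i + 3) := by
          rw [hc', List.getD_eq_getElem cs ' ' hi2]
          exact List.drop_eq_getElem_cons hi2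
        rw [hd0, hd1, hd2]
        simp only [wtop, windows]
        by_cases hD : (a = b ∧ a ≠ 'e' ∧ a ≠ 'o')
        · rw [if_pos hD]
          have hbd : badDup a b = true := decide_eq_true hD
          simp [hbd]
        · by_cases hA : a ∈ pyVowelA <;> by_cases hB : b ∈ pyVowelA <;>
            by_cases hC : c ∈ pyVowelA <;>
              simp [badDup, bad3, isV, hD, hguard, hA, hB, hC,
                Bool.or_assoc, Bool.and_assoc]

theorem isIn_iff_mem (c : Char) (sub pw : String) (hsub : sub.toList = [c]) :
    PySem.Str.isIn sub pw = true ↔ c ∈ pw.toList := by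
  rw [PySem.Str.isIn_iff_infix, hsub]
  constructor
  · intro h
    exact h.sublist.subset (by simp)
  · intro h
    rcases List.append_of_mem h with ⟨l1, l2, hsplit⟩
    exact ⟨l1, l2, by rw [hsplit]; simp⟩

theorem anyV_iff (cs : List Char) : cs.any isV = true ↔
    ('a' ∈ cs ∨ 'e' ∈ cs ∨ 'i' ∈ cs ∨ 'o' ∈ cs ∨ 'u' ∈ cs) := by
  simp only [List.any_eq_true, isV, pyVowelA, List.contains_cons, List.contains_nil,
    Bool.or_eq_true, beq_iff_eq, Bool.false_eq_true, or_false]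
  constructor
  · rintro ⟨x, hx, rfl | rfl | rfl | rfl | rfl⟩ <;> tauto
  · rintro (h | h | h | h | h) <;> exact ⟨_, h, by tauto⟩

theorem check_pw_spec : Claim_equal_check_pw := by
  intro pw _
  unfold Spec_check_pw check_pw check_pw_alt
  rw [checkBLoop_eq]
  have hA := checkALoop_drop (pw.toList.length) 0 pw.toList (by omega)
  simp only [Nat.cast_zero, List.drop_zero] at hA
  have hlen : PySem.Str.len pw = ((pw.toList.length : Int)) := by
    simp [PySem.Str.len_eq]
  rw [hlen, hA]
  have ha := isIn_iff_mem 'a' "a" pw (by decide)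
  have he := isIn_iff_mem 'e' "e" pw (by decide)
  have hi := isIn_iff_mem 'i' "i" pw (by decide)
  have ho := isIn_iff_mem 'o' "o" pw (by decide)
  have hu := isIn_iff_mem 'u' "u" pw (by decide)
  by_cases hv : pw.toList.any isV = true
  · have hG : ¬(¬PySem.Str.isIn "a" pw = true ∧ ¬PySem.Str.isIn "e" pw = true ∧
        ¬PySem.Str.isIn "i" pw = true ∧ ¬PySem.Str.isIn "o" pw = true ∧
        ¬PySem.Str.isIn "u" pw = true) := by
      intro g
      rcases (anyV_iff pw.toList).mp hv with h | h | h | h | h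
      · exact g.1 (ha.mpr h)
      · exact g.2.1 (he.mpr h)
      · exact g.2.2.1 (hi.mpr h)
      · exact g.2.2.2.1 (ho.mpr h)
      · exact g.2.2.2.2 (hu.mpr h)
    rw [if_neg hG, hv, Bool.and_true]
  · have hv' : pw.toList.any isV = false := by simpa using hv
    have hG : (¬PySem.Str.isIn "a" pw = true ∧ ¬PySem.Str.isIn "e" pw = true ∧
        ¬PySem.Str.isIn "i" pw = true ∧ ¬PySem.Str.isIn "o" pw = true ∧
        ¬PySem.Str.isIn "u" pw = true) :=
      ⟨fun h => hv ((anyV_iff _).mpr (Or.inl (ha.mp h))),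
       fun h => hv ((anyV_iff _).mpr (Or.inr (Or.inl (he.mp h)))),
       fun h => hv ((anyV_iff _).mpr (Or.inr (Or.inr (Or.inl (hi.mp h))))),
       fun h => hv ((anyV_iff _).mpr (Or.inr (Or.inr (Or.inr (Or.inl (ho.mp h)))))),
       fun h => hv ((anyV_iff _).mpr (Or.inr (Or.inr (Or.inr (Or.inr (hu.mp h))))))⟩
    rw [if_pos hG, hv', Bool.and_false]
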